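-- pv_equiv track=rewrite | github.com/tsdavies/portfolio-algorithms-2025-msc | d1478699_cw1.py | exercise5
-- ===== SOURCE A (Python) =====
-- def find_cliques(net, curr_clique, to_add, to_skip, cliques):
--
--     # If no more nodes to add or skip, this is a maximal clique
--     if not to_add and not to_skip:
--         cliques.append(curr_clique)
--         return
--
--     # Try adding each node in to_add to the clique
--     for node in list(to_add):
--         # Add the node to the current clique
--         new_clique = curr_clique + [node]
--
--         # Find neighbors of this node that can join the clique
--         add_next = [n for n in to_add if net[node][n] == 1]
--         skip_next = [n for n in to_skip if net[node][n] == 1]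
--
--         # Recursively find larger cliques
--         find_cliques(net, new_clique, add_next, skip_next, cliques)
--
--         # Move node from to_add to to_skip
--         to_add.remove(node)
--         to_skip.append(node)
--
-- def exercise5(net):
--
--     n = len(net)  # Number of actors (nodes)
--     cliques = []  # List to store all maximal cliques
--
--     # Find all maximal cliques and count how many cliques each node belongs to
--     find_cliques(net, [], list(range(n)), [], cliques)
--     counts = [0] * n
--     for node in range(n):
--         for c in cliques:
--             if node in c:
--                 counts[node] += 1
--
--     return counts
-- ===== SOURCE B (Python) =====
-- def exercise5(net):
--     n = len(net)
--     counts = [0] * n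
--
--     # Binary decision-tree search: for the first remaining candidate v, either
--     # v joins the clique (keep only its neighbours as candidates/banned) or v is
--     # banned; a maximal clique is reached when both sets are exhausted, and its
--     # members are tallied directly into counts.
--     def explore(clique, cand, banned):
--         if not cand:
--             if not banned:
--                 for v in clique:
--                     counts[v] += 1
--             return
--         v = cand[0]
--         # branch 1: v joins the clique
--         explore(clique + [v],
--                 [x for x in cand if net[v][x] == 1],
--                 [x for x in banned if net[v][x] == 1])
--         # branch 2: v is excluded from the clique
--         explore(clique, cand[1:], banned + [v])
--
--     explore([], list(range(n)), [])
--     return counts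
-- ===== Notes on version B (the rewrite author's own statement) =====
-- stated objective: alternative
-- what changed: B replaces A's candidate for-loop recursion (iterate over to_add, recurse per node, mutate to_add/to_skip) plus a separate collect-all-cliques-then-scan counting phase by a binary include/exclude decision-tree recursion on the first remaining candidate that tallies each maximal clique's members directly into the counts array.
import Mathlib
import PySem

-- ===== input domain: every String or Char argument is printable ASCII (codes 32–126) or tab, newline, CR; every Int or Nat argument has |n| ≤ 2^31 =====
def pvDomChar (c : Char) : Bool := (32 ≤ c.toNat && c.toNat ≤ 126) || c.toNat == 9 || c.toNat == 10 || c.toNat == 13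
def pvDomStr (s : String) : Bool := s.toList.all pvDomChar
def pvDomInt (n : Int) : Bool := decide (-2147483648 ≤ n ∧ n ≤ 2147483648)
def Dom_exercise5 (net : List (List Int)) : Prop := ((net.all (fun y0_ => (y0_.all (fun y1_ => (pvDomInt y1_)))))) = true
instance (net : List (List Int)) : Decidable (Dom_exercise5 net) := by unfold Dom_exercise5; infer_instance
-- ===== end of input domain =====

-- B replaces A's candidate for-loop recursion plus a separate clique-collection/counting phase
-- by a binary include/exclude decision-tree recursion that tallies each maximal clique directly.

-- ===== PORT A =====
-- both Pythons test edges with 'net[v][x] == 1' (out-of-range indexing raises; such inputs are outside Pre_)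
def pvEdge (net : List (List Int)) (a b : Int) : Bool :=
  ((PySem.List.pyGet? net a).bind (fun r => PySem.List.pyGet? r b)) == some 1

-- loop body of find_cliques's 'for node in list(to_add)'; f is the recursive call at the next fuel
def fcStep (net : List (List Int)) (f : List Int → List Int → List Int → List (List Int) → List (List Int))
    (curr : List Int) (s : List Int × List Int × List (List Int)) (node : Int) :
    List Int × List Int × List (List Int) :=
  let newClique := curr ++ [node]
  let addNext := s.1.filter (fun x => pvEdge net node x)
  let skipNext := s.2.1.filter (fun x => pvEdge net node x)
  let cl := f newClique addNext skipNext s.2.2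
  -- to_add.remove(node) never raises here (to_add stays duplicate-free); .getD is the total form
  ((PySem.List.remove? s.1 node).getD s.1, s.2.1 ++ [node], cl)

-- find_cliques; fuel (net.length+1) only totalizes the recursion, it is never exhausted on Pre_ inputs
def findCliques (net : List (List Int)) :
    Nat → List Int → List Int → List Int → List (List Int) → List (List Int)
  | 0, _, _, _, cliques => cliques
  | fuel+1, curr, toAdd, toSkip, cliques =>
    if toAdd.isEmpty && toSkip.isEmpty then cliques ++ [curr]
    else (toAdd.foldl (fcStep net (findCliques net fuel) curr) (toAdd, toSkip, cliques)).2.2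

def exercise5 (net : List (List Int)) : List Int :=
  let n := net.length
  let cliques := findCliques net (n+1) [] (PySem.List.pyRange 0 (n : Int) 1) [] []
  let counts := List.replicate n (0 : Int)
  (PySem.List.pyRange 0 (n : Int) 1).foldl (fun counts node =>
    cliques.foldl (fun counts c =>
      if c.contains node then
        PySem.List.pySetD counts node (PySem.List.pyGetD counts node 0 + 1)
      else counts) counts) counts

-- ===== PORT B =====
-- explore(clique, cand, banned): binary branch on the first candidate (include it / ban it);
-- fuel only totalizes the recursion (it decreases on the include branch, cand shrinks on the
-- exclude branch) and is never exhausted on Pre_ inputs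
def binCount (net : List (List Int)) :
    Nat → List Int → List Int → List Int → List Int → List Int
  | 0, _, _, _, counts => counts
  | _+1, clique, [], banned, counts =>
    if banned.isEmpty then
      clique.foldl (fun cs v => PySem.List.pySetD cs v (PySem.List.pyGetD cs v 0 + 1)) counts
    else counts
  | fuel+1, clique, v :: rest, banned, counts =>
    binCount net (fuel+1) clique rest (banned ++ [v])
      (binCount net fuel (clique ++ [v]) ((v :: rest).filter (fun x => pvEdge net v x))
        (banned.filter (fun x => pvEdge net v x)) counts)
  termination_by fuel _ cand _ _ => (fuel, cand.length)

def exercise5_alt (net : List (List Int)) : List Int :=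
  binCount net (net.length+1) [] (PySem.List.pyRange 0 (net.length : Int) 1) []
    (List.replicate net.length (0 : Int))

-- ===== PRECONDITION & SPEC =====
-- Pre_ excludes exactly the inputs where Python A raises: a row shorter than the node count
-- (IndexError in the edge test) or a diagonal entry equal to 1 (a self-loop makes find_cliques
-- recurse forever: RecursionError).
def Pre_exercise5 (net : List (List Int)) : Prop :=
  (∀ row ∈ net, net.length ≤ row.length) ∧
  (∀ i, i < net.length → (net.getD i []).getD i 0 ≠ 1)
instance (net : List (List Int)) : Decidable (Pre_exercise5 net) := by
  unfold Pre_exercise5; infer_instance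
def pvWitness_exercise5 : List (List Int) := [[0, 1, 1], [1, 0, 0], [1, 0, 0]]

def Spec_exercise5 (net : List (List Int)) (out : List Int) : Prop := out = exercise5_alt net
instance (net : List (List Int)) (out : List Int) : Decidable (Spec_exercise5 net out) := by
  unfold Spec_exercise5; infer_instance

-- ===== CLAIM (what is proved, stated in full; the proofs are below) =====
def Claim_equal_exercise5 : Prop :=
  ∀ (net : List (List Int)), Dom_exercise5 net → Pre_exercise5 net → Spec_exercise5 net (exercise5 net)

-- ===== LEMMAS AND PROOFS =====

-- one 'counts[v] += 1' step, and the tally of a whole clique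
def pvIncr (cs : List Int) (v : Int) : List Int :=
  PySem.List.pySetD cs v (PySem.List.pyGetD cs v 0 + 1)
def pvTally (cs : List Int) (c : List Int) : List Int := c.foldl pvIncr cs

-- the fold's cliques component is append-only (hf: the inner-fuel recursion is append-only)
theorem fold_append (net : List (List Int)) (fuel : Nat) (curr : List Int)
    (hf : ∀ a b c d, findCliques net fuel a b c d = d ++ findCliques net fuel a b c []) :
    ∀ (l ta ts : List Int) (cl : List (List Int)),
      l.foldl (fcStep net (findCliques net fuel) curr) (ta, ts, cl)
        = ((l.foldl (fcStep net (findCliques net fuel) curr) (ta, ts, [])).1,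
           (l.foldl (fcStep net (findCliques net fuel) curr) (ta, ts, [])).2.1,
           cl ++ (l.foldl (fcStep net (findCliques net fuel) curr) (ta, ts, [])).2.2) := by
  intro l
  induction l with
  | nil => intro ta ts cl; simp
  | cons x l ih =>
    intro ta ts cl
    have hstep : ∀ cl' : List (List Int), fcStep net (findCliques net fuel) curr (ta, ts, cl') x
        = ((PySem.List.remove? ta x).getD ta, ts ++ [x],
           cl' ++ findCliques net fuel (curr ++ [x]) (ta.filter (fun y => pvEdge net x y))
                    (ts.filter (fun y => pvEdge net x y)) []) := by
      intro cl'; simp only [fcStep]; rw [hf]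
    simp only [List.foldl_cons, hstep, List.nil_append]
    rw [ih, ih ((PySem.List.remove? ta x).getD ta) (ts ++ [x])
          (findCliques net fuel (curr ++ [x]) (ta.filter (fun y => pvEdge net x y))
            (ts.filter (fun y => pvEdge net x y)) [])]
    simp [List.append_assoc]

-- the cliques accumulator of find_cliques is append-only
theorem fc_append (net : List (List Int)) :
    ∀ (fuel : Nat) (curr ta ts : List Int) (cl : List (List Int)),
      findCliques net fuel curr ta ts cl = cl ++ findCliques net fuel curr ta ts [] := by
  intro fuel
  induction fuel with
  | zero => intro curr ta ts cl; simp [findCliques]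
  | succ f ih =>
    intro curr ta ts cl
    by_cases h : (ta.isEmpty && ts.isEmpty) = true
    · simp [findCliques, h]
    · simp only [findCliques, h, Bool.false_eq_true, if_false]
      rw [fold_append net f curr ih, fold_append net f curr ih ta ta ts []]

-- one frame of A splits into its first include-child's cliques and the remaining loop's cliques
theorem fc_cons (net : List (List Int)) (f : Nat) (curr : List Int) (v : Int) (rest ts : List Int) :
    findCliques net (f+1) curr (v :: rest) ts []
      = findCliques net f (curr ++ [v]) ((v :: rest).filter (fun x => pvEdge net v x))
          (ts.filter (fun x => pvEdge net v x)) []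
        ++ findCliques net (f+1) curr rest (ts ++ [v]) [] := by
  have h1 : ((v :: rest).isEmpty && ts.isEmpty) = false := by simp
  have hfcstep : fcStep net (findCliques net f) curr (v :: rest, ts, []) v
      = (rest, ts ++ [v],
         findCliques net f (curr ++ [v]) ((v :: rest).filter (fun x => pvEdge net v x))
           (ts.filter (fun x => pvEdge net v x)) []) := by
    simp only [fcStep, PySem.List.remove?_cons_self, Option.getD_some]
  have h2 : (rest.isEmpty && (ts ++ [v]).isEmpty) = false := by simp
  simp only [findCliques, h1, Bool.false_eq_true, if_false, List.foldl_cons, hfcstep, h2]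
  rw [fold_append net f curr (fc_append net f) rest rest (ts ++ [v])
        (findCliques net f (curr ++ [v]) ((v :: rest).filter (fun x => pvEdge net v x))
          (ts.filter (fun x => pvEdge net v x)) [])]

-- MAIN: B's binary include/exclude recursion tallies exactly A's clique list, at every fuel
theorem bin_eq (net : List (List Int)) :
    ∀ (fuel : Nat) (ta curr ts counts : List Int),
      binCount net fuel curr ta ts counts
        = (findCliques net fuel curr ta ts []).foldl pvTally counts := by
  intro fuel
  induction fuel with
  | zero => intro ta curr ts counts; simp [binCount, findCliques]
  | succ f ih =>
    intro ta
    induction ta with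
    | nil =>
      intro curr ts counts
      by_cases h : ts.isEmpty
      · simp only [binCount, findCliques, h, List.isEmpty_nil, Bool.and_self, if_true]
        rfl
      · simp only [binCount, findCliques, h, List.isEmpty_nil, Bool.true_and, if_false,
          Bool.false_eq_true]
        simp
    | cons v rest ihr =>
      intro curr ts counts
      simp only [binCount]
      rw [ih, ihr, fc_cons, List.foldl_append]

-- Pre_ kills self-loops: the edge test is false on the diagonal
theorem edge_self_false (net : List (List Int)) (hpre : Pre_exercise5 net) (v : Int)
    (h0 : 0 ≤ v) (h1 : v < (net.length : Int)) : pvEdge net v v = false := by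
  obtain ⟨hrow, hdiag⟩ := hpre
  have hv : v = ((v.toNat : Nat) : Int) := (Int.toNat_of_nonneg h0).symm
  have hkn : v.toNat < net.length := by omega
  have hklen : v.toNat < net[v.toNat].length :=
    lt_of_lt_of_le hkn (hrow _ (List.getElem_mem hkn))
  have hne : net[v.toNat][v.toNat] ≠ 1 := by
    have := hdiag v.toNat hkn
    rwa [List.getD_eq_getElem net [] hkn, List.getD_eq_getElem _ 0 hklen] at this
  have hget : PySem.List.pyGet? net (((v.toNat : Nat)) : Int) = some net[v.toNat] := by
    rw [PySem.List.pyGet?_natCast, List.getElem?_eq_getElem hkn]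
  have hget2 : PySem.List.pyGet? net[v.toNat] (((v.toNat : Nat)) : Int) = some net[v.toNat][v.toNat] := by
    rw [PySem.List.pyGet?_natCast, List.getElem?_eq_getElem hklen]
  rw [pvEdge, hv, hget]
  show (PySem.List.pyGet? net[v.toNat] (((v.toNat : Nat)) : Int) == some (1 : Int)) = false
  rw [hget2]
  simp [hne]

-- every clique A collects is duplicate-free with members in [0, net.length)
theorem fc_cliques_inv (net : List (List Int)) (hpre : Pre_exercise5 net) :
    ∀ (fuel : Nat) (curr ta ts : List Int),
      curr.Nodup → (∀ v ∈ curr, 0 ≤ v ∧ v < (net.length : Int)) →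
      ta.Nodup → (∀ v ∈ ta, 0 ≤ v ∧ v < (net.length : Int)) →
      (∀ v ∈ curr, v ∉ ta) →
      ∀ c ∈ findCliques net fuel curr ta ts [],
        c.Nodup ∧ ∀ v ∈ c, 0 ≤ v ∧ v < (net.length : Int) := by
  intro fuel
  induction fuel with
  | zero => intro curr ta ts _ _ _ _ _ c hc; simp [findCliques] at hc
  | succ f ih =>
    intro curr ta ts hcn hcb htn htb hdisj c hc
    by_cases h : (ta.isEmpty && ts.isEmpty) = true
    · simp only [findCliques, h, if_true, List.nil_append, List.mem_singleton] at hc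
      subst hc; exact ⟨hcn, hcb⟩
    · simp only [findCliques, h, Bool.false_eq_true, if_false] at hc
      have aux : ∀ (suf ts' : List Int), suf.Nodup →
          (∀ v ∈ suf, 0 ≤ v ∧ v < (net.length : Int)) → (∀ v ∈ curr, v ∉ suf) →
          ∀ c ∈ (suf.foldl (fcStep net (findCliques net f) curr) (suf, ts', [])).2.2,
            c.Nodup ∧ ∀ v ∈ c, 0 ≤ v ∧ v < (net.length : Int) := by
        intro suf
        induction suf with
        | nil => intro ts' _ _ _ c hc; simp at hc
        | cons v rest ihs =>
          intro ts' hnd hb hdj c hc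
          rw [List.foldl_cons] at hc
          have hfcstep : fcStep net (findCliques net f) curr (v :: rest, ts', []) v
              = (rest, ts' ++ [v], findCliques net f (curr ++ [v])
                  ((v :: rest).filter (fun x => pvEdge net v x))
                  (ts'.filter (fun x => pvEdge net v x)) []) := by
            simp only [fcStep, PySem.List.remove?_cons_self, Option.getD_some]
          rw [hfcstep] at hc
          rw [fold_append net f curr (fc_append net f) rest rest (ts' ++ [v])
                (findCliques net f (curr ++ [v]) ((v :: rest).filter (fun x => pvEdge net v x))
                  (ts'.filter (fun x => pvEdge net v x)) [])] at hc
          rcases List.mem_append.mp hc with hc1 | hc2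
          · have hvb := hb v (by simp)
            have hvnotcurr : v ∉ curr := fun hv => hdj v hv (by simp)
            have hself : pvEdge net v v = false := edge_self_false net hpre v hvb.1 hvb.2
            refine ih (curr ++ [v]) ((v :: rest).filter (fun x => pvEdge net v x))
              (ts'.filter (fun x => pvEdge net v x)) ?_ ?_ ?_ ?_ ?_ c hc1
            · simp [List.nodup_append, hcn]
              intro a ha hav
              exact hvnotcurr (hav ▸ ha)
            · intro x hx
              rcases List.mem_append.mp hx with hx1 | hx2
              · exact hcb x hx1
              · simp at hx2; subst hx2; exact hvb
            · exact hnd.filter _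
            · intro x hx; exact hb x (List.mem_of_mem_filter hx)
            · intro x hx hxf
              rcases List.mem_append.mp hx with hx1 | hx2
              · exact hdj x hx1 (List.mem_of_mem_filter hxf)
              · simp at hx2; subst hx2
                rcases List.mem_filter.mp hxf with ⟨hmem, hedge⟩
                rcases List.mem_cons.mp hmem with hxx | hxr
                · rw [hself] at hedge; exact Bool.false_ne_true hedge
                · exact (List.nodup_cons.mp hnd).1 hxr
          · exact ihs (ts' ++ [v]) (List.nodup_cons.mp hnd).2
              (fun x hx => hb x (List.mem_cons_of_mem _ hx))
              (fun x hx hxr => hdj x hx (List.mem_cons_of_mem _ hxr)) c hc2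
      exact aux ta ts htn htb hdisj c hc

-- getD after set
theorem getD_set_int (cs : List Int) (k j : Nat) (x : Int) (hk : k < cs.length) :
    (cs.set k x).getD j 0 = if j = k then x else cs.getD j 0 := by
  by_cases hj : j = k
  · subst hj; simp [List.getD_eq_getElem?_getD, hk]
  · simp [List.getD_eq_getElem?_getD, List.getElem?_set_ne (fun h => hj h.symm), hj]

-- tallying one duplicate-free clique, elementwise
theorem tally_getElem? (c : List Int) :
    ∀ (cs : List Int), c.Nodup → (∀ v ∈ c, 0 ≤ v ∧ v < (cs.length : Int)) →
      (pvTally cs c).length = cs.length ∧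
      ∀ (j : Nat), j < cs.length →
        (pvTally cs c)[j]? = some (cs.getD j 0 + (if ((j : Int) ∈ c) then 1 else 0)) := by
  induction c with
  | nil =>
    intro cs _ _
    refine ⟨rfl, fun j hj => ?_⟩
    simp [pvTally, List.getElem?_eq_getElem hj, List.getD_eq_getElem?_getD]
  | cons v rest ihc =>
    intro cs hnd hb
    obtain ⟨hv0, hvlt⟩ := hb v (by simp)
    have hvn : v.toNat < cs.length := by omega
    have hveq : ((v.toNat : Nat) : Int) = v := Int.toNat_of_nonneg hv0
    have hIncr : pvIncr cs v = cs.set v.toNat (cs.getD v.toNat 0 + 1) := by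
      rw [pvIncr, ← hveq, PySem.List.pySetD_natCast, PySem.List.pyGetD_natCast]
      simp only [Int.toNat_natCast]
    have hlen : (pvIncr cs v).length = cs.length := by rw [hIncr]; simp
    have hTal : pvTally cs (v :: rest) = pvTally (pvIncr cs v) rest := rfl
    have hrest := ihc (pvIncr cs v) (List.nodup_cons.mp hnd).2
      (by intro x hx; rw [hlen]; exact hb x (List.mem_cons_of_mem _ hx))
    refine ⟨by rw [hTal, hrest.1, hlen], fun j hj => ?_⟩
    rw [hTal, hrest.2 j (by rw [hlen]; exact hj)]
    rw [hIncr, getD_set_int cs v.toNat j _ hvn]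
    by_cases hjv : j = v.toNat
    · subst hjv
      have hjnotr : ((v.toNat : Nat) : Int) ∉ rest := by
        rw [hveq]; exact (List.nodup_cons.mp hnd).1
      have hmem : ((v.toNat : Nat) : Int) ∈ v :: rest := by
        rw [hveq]; exact List.mem_cons_self
      rw [if_pos rfl, if_neg hjnotr, if_pos hmem]
      norm_num
    · have hjm : ((j : Nat) : Int) ≠ v := fun h => hjv (by omega)
      rw [if_neg hjv]
      by_cases hr : ((j : Nat) : Int) ∈ rest
      · rw [if_pos hr, if_pos (List.mem_cons_of_mem _ hr)]
      · rw [if_neg hr, if_neg (by simp [List.mem_cons, hjm, hr])]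

-- tallying a list of cliques, elementwise
theorem tally_fold_getElem? (cls : List (List Int)) :
    ∀ (cs : List Int), (∀ c ∈ cls, c.Nodup ∧ ∀ v ∈ c, 0 ≤ v ∧ v < (cs.length : Int)) →
      (cls.foldl pvTally cs).length = cs.length ∧
      ∀ (j : Nat), j < cs.length →
        (cls.foldl pvTally cs)[j]? = some (cs.getD j 0 + (cls.countP (fun c => c.contains (j : Int)) : Int)) := by
  induction cls with
  | nil =>
    intro cs _
    refine ⟨rfl, fun j hj => ?_⟩
    simp [List.getElem?_eq_getElem hj, List.getD_eq_getElem?_getD]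
  | cons c cls ih =>
    intro cs hP
    obtain ⟨hcnd, hcb⟩ := hP c (by simp)
    have h1 := tally_getElem? c cs hcnd hcb
    have ih1 := ih (pvTally cs c)
      (by intro c' hc'; rw [h1.1]; exact hP c' (List.mem_cons_of_mem _ hc'))
    have hTal : (c :: cls).foldl pvTally cs = cls.foldl pvTally (pvTally cs c) := rfl
    refine ⟨by rw [hTal, ih1.1, h1.1], fun j hj => ?_⟩
    rw [hTal, ih1.2 j (by rw [h1.1]; exact hj)]
    have hg : (pvTally cs c).getD j 0 = cs.getD j 0 + (if ((j : Int) ∈ c) then 1 else 0) := by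
      rw [List.getD_eq_getElem?_getD, h1.2 j hj, Option.getD_some]
    rw [hg, List.countP_cons]
    by_cases hm : ((j : Nat) : Int) ∈ c
    · have hmc : c.contains ((j : Nat) : Int) = true := by simpa using hm
      rw [if_pos hm, if_pos hmc]
      congr 1
      push_cast
      ring
    · have hmc : ¬ c.contains ((j : Nat) : Int) = true := by simpa using hm
      rw [if_neg hm, if_neg hmc]
      congr 1
      push_cast
      ring

-- A's inner counting loop collapses to a single set at index i
theorem countA_inner (cls : List (List Int)) (i : Nat) :
    ∀ (cs : List Int), i < cs.length →
      cls.foldl (fun counts c =>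
          if c.contains (i : Int) then
            PySem.List.pySetD counts (i : Int) (PySem.List.pyGetD counts (i : Int) 0 + 1)
          else counts) cs
        = PySem.List.pySetD cs (i : Int) (cs.getD i 0 + (cls.countP (fun c => c.contains (i : Int)) : Int)) := by
  induction cls with
  | nil =>
    intro cs hi
    simp [PySem.List.pySetD_natCast, List.getD_eq_getElem?_getD,
      List.getElem?_eq_getElem hi, List.set_getElem_self]
  | cons c cls ih =>
    intro cs hi
    rw [List.foldl_cons]
    by_cases hm : c.contains ((i : Nat) : Int) = true
    · rw [if_pos hm]
      have hi' : i < (PySem.List.pySetD cs ((i : Nat) : Int)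
          (PySem.List.pyGetD cs ((i : Nat) : Int) 0 + 1)).length := by
        simpa using hi
      rw [ih _ hi']
      simp only [PySem.List.pySetD_natCast, PySem.List.pyGetD_natCast]
      rw [getD_set_int cs i i _ hi]
      simp only [List.set_set, List.countP_cons, hm, if_true]
      congr 1
      push_cast
      ring
    · rw [if_neg hm, ih _ hi]
      simp only [List.countP_cons, hm]
      simp [Bool.false_eq_true]

-- A's outer counting loop, elementwise
theorem countA_outer (cls : List (List Int)) :
    ∀ (ks : List Nat) (cs : List Int), ks.Nodup → (∀ k ∈ ks, k < cs.length) →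
      (ks.foldl (fun counts k =>
          cls.foldl (fun counts c =>
            if c.contains (k : Int) then
              PySem.List.pySetD counts (k : Int) (PySem.List.pyGetD counts (k : Int) 0 + 1)
            else counts) counts) cs).length = cs.length ∧
      ∀ (j : Nat), j < cs.length →
        (ks.foldl (fun counts k =>
          cls.foldl (fun counts c =>
            if c.contains (k : Int) then
              PySem.List.pySetD counts (k : Int) (PySem.List.pyGetD counts (k : Int) 0 + 1)
            else counts) counts) cs)[j]?
          = if j ∈ ks then some (cs.getD j 0 + (cls.countP (fun c => c.contains (j : Int)) : Int)) else cs[j]? := by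
  intro ks
  induction ks with
  | nil =>
    intro cs _ _
    exact ⟨rfl, fun j hj => by simp⟩
  | cons k ks ih =>
    intro cs hnd hb
    have hk : k < cs.length := hb k (by simp)
    simp only [List.foldl_cons]
    rw [countA_inner cls k cs hk]
    have hset : PySem.List.pySetD cs ((k : Nat) : Int)
          (cs.getD k 0 + (cls.countP (fun c => c.contains ((k : Nat) : Int)) : Int))
        = cs.set k (cs.getD k 0 + (cls.countP (fun c => c.contains ((k : Nat) : Int)) : Int)) := by
      rw [PySem.List.pySetD_natCast]
    have hlen1 : (PySem.List.pySetD cs ((k : Nat) : Int)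
          (cs.getD k 0 + (cls.countP (fun c => c.contains ((k : Nat) : Int)) : Int))).length
        = cs.length := by rw [hset]; simp
    have ihh := ih (PySem.List.pySetD cs ((k : Nat) : Int)
        (cs.getD k 0 + (cls.countP (fun c => c.contains ((k : Nat) : Int)) : Int)))
      (List.nodup_cons.mp hnd).2
      (by intro k' hk'; rw [hlen1]; exact hb k' (List.mem_cons_of_mem _ hk'))
    refine ⟨by rw [ihh.1, hlen1], fun j hj => ?_⟩
    rw [ihh.2 j (by rw [hlen1]; exact hj)]
    by_cases hjk : j ∈ ks
    · have hjne : j ≠ k := fun h => (List.nodup_cons.mp hnd).1 (h ▸ hjk)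
      rw [if_pos hjk, if_pos (List.mem_cons_of_mem _ hjk)]
      rw [hset, getD_set_int cs k j _ hk, if_neg hjne]
    · rw [if_neg hjk]
      by_cases hjk2 : j = k
      · subst hjk2
        rw [if_pos List.mem_cons_self, hset]
        simp [hk]
      · rw [if_neg (by simp [hjk, hjk2]), hset, List.getElem?_set_ne (fun h => hjk2 h.symm)]

-- ===== VERDICT (by name: the statement is the Claim_ definition above) =====
theorem exercise5_spec : Claim_equal_exercise5 := by
  intro net hdom hpre
  show exercise5 net = exercise5_alt net
  have hnd : (PySem.List.pyRange 0 (net.length : Int) 1).Nodup := PySem.List.nodup_pyRange_one _ _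
  have hbounds : ∀ v ∈ PySem.List.pyRange 0 (net.length : Int) 1, 0 ≤ v ∧ v < (net.length : Int) := by
    intro v hv
    have := (PySem.List.mem_pyRange_one).mp hv
    exact this
  have hinv := fc_cliques_inv net hpre (net.length + 1) [] (PySem.List.pyRange 0 (net.length : Int) 1) []
    (by simp) (by simp) hnd hbounds (by simp)
  have hB : exercise5_alt net
      = (findCliques net (net.length + 1) [] (PySem.List.pyRange 0 (net.length : Int) 1) [] []).foldl
          pvTally (List.replicate net.length 0) := by
    rw [exercise5_alt]
    exact bin_eq net (net.length + 1) _ [] [] _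
  have hBtal := tally_fold_getElem?
    (findCliques net (net.length + 1) [] (PySem.List.pyRange 0 (net.length : Int) 1) [] [])
    (List.replicate net.length 0)
    (by intro c hc; have := hinv c hc; simpa using this)
  have hr : PySem.List.pyRange 0 (net.length : Int) 1
      = (List.range net.length).map (fun k => ((k : Nat) : Int)) := by
    rw [PySem.List.pyRange_one]
    simp
  have hA : exercise5 net
      = (List.range net.length).foldl (fun counts k =>
          (findCliques net (net.length + 1) [] (PySem.List.pyRange 0 (net.length : Int) 1) [] []).foldl
            (fun counts c =>
              if c.contains ((k : Nat) : Int) then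
                PySem.List.pySetD counts ((k : Nat) : Int) (PySem.List.pyGetD counts ((k : Nat) : Int) 0 + 1)
              else counts) counts) (List.replicate net.length 0) := by
    simp only [exercise5]
    rw [hr, List.foldl_map]
  have hAout := countA_outer
    (findCliques net (net.length + 1) [] (PySem.List.pyRange 0 (net.length : Int) 1) [] [])
    (List.range net.length) (List.replicate net.length 0)
    List.nodup_range (by intro k hk; simpa using List.mem_range.mp hk)
  apply List.ext_getElem?
  intro j
  by_cases hj : j < net.length
  · rw [hA, hB]
    rw [hAout.2 j (by simpa using hj), hBtal.2 j (by simpa using hj)]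
    rw [if_pos (List.mem_range.mpr hj)]
  · have hAlen : (exercise5 net).length = net.length := by
      rw [hA]; rw [hAout.1]; simp
    have hBlen : (exercise5_alt net).length = net.length := by
      rw [hB]; rw [hBtal.1]; simp
    rw [List.getElem?_eq_none (by omega), List.getElem?_eq_none (by omega)]
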